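-- pv_equiv track=rewrite | github.com/DragonSecSI/DCTF-2022 | challs/context_free_grammar/solve.py | next_nonterminal
-- ===== SOURCE A (Python) =====
-- def next_nonterminal(nonterminal):
--     nt = nonterminal[:]
--
--     # skip 'S' which is the starting symbol
--     if nt == 'R':
--         return 'T'
--
--     elif nt[-1] != 'Z':
--         nt = nt[:-1] + chr(ord(nt[-1]) + 1)
--         return nt
--
--     elif len(nt) > 1:
--         return next_nonterminal(nt[:-1]) + 'A'
--
--     else:
--         return 'AA'
-- ===== SOURCE B (Python) =====
-- def next_nonterminal(nonterminal):
--     chars = list(nonterminal)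
--     i = len(chars) - 1
--     while i > 0 and chars[i] == 'Z':
--         chars[i] = 'A'
--         i -= 1
--     if i > 0:
--         chars[i] = chr(ord(chars[i]) + 1)
--         return ''.join(chars)
--     c = chars[0]
--     if c == 'R':
--         return 'T' + ''.join(chars[1:])
--     if c == 'Z':
--         return 'AA' + ''.join(chars[1:])
--     return chr(ord(c) + 1) + ''.join(chars[1:])
-- ===== Notes on version B (the rewrite author's own statement) =====
-- stated objective: alternative
-- what changed: Replaces A's recursion (which rebuilds the string with slicing at every carry step) by a single right-to-left iterative carry loop over a char list, with the R/T and Z/AA rules applied once at the leftmost position.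
import Mathlib
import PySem

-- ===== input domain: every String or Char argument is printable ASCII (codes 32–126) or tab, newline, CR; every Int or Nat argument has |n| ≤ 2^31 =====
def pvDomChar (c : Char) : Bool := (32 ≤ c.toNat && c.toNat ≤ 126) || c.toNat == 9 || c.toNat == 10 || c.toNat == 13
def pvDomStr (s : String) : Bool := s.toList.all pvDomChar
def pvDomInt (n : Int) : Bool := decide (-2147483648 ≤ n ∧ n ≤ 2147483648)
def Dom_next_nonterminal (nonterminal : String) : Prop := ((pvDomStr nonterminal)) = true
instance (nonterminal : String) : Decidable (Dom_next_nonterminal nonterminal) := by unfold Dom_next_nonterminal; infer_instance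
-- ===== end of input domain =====

-- B rewrites A's recursive slicing as one iterative right-to-left carry loop over a char list (alternative decomposition).
-- Pre_ excludes only the empty string, on which both Pythons raise IndexError.


-- ===== PORT A =====
-- A's recursion, transliterated over the char list of the string ([] = the IndexError case, excluded by Pre_).
def nextNtA (nt : List Char) : List Char :=
  if h : nt = [] then []            -- Python: nt[-1] raises IndexError here (outside Pre_)
  else
    let c := nt.getLast h           -- nt[-1]
    if nt = ['R'] then ['T']
    else if c ≠ 'Z' then nt.dropLast ++ [Char.ofNat (c.toNat + 1)]   -- nt[:-1] + chr(ord(nt[-1]) + 1)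
    else if 1 < nt.length then nextNtA nt.dropLast ++ ['A']          -- next_nonterminal(nt[:-1]) + 'A'
    else ['A', 'A']
termination_by nt.length
decreasing_by
  simp [List.length_dropLast]
  exact List.length_pos_iff.mpr h

def next_nonterminal (nonterminal : String) : String :=
  String.mk (nextNtA nonterminal.toList)

-- ===== PORT B =====
-- B's while loop: while i > 0 and chars[i] == 'Z': chars[i] = 'A'; i -= 1
def carryB (cs : List Char) (i : Nat) : List Char × Nat :=
  if 0 < i ∧ cs.getD i ' ' = 'Z' then carryB (cs.set i 'A') (i - 1) else (cs, i)
termination_by i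

-- B's code after the loop (the if/else chain on position i)
def finishB (cs : List Char) (i : Nat) : List Char :=
  if 0 < i then cs.set i (Char.ofNat ((cs.getD i ' ').toNat + 1))   -- chars[i] = chr(ord(chars[i]) + 1)
  else
    match cs with
    | [] => []                       -- Python: chars[0] raises IndexError (outside Pre_)
    | c :: rest =>
      if c = 'R' then 'T' :: rest
      else if c = 'Z' then 'A' :: 'A' :: rest
      else Char.ofNat (c.toNat + 1) :: rest

def nextNtB (cs0 : List Char) : List Char :=
  finishB (carryB cs0 (cs0.length - 1)).1 (carryB cs0 (cs0.length - 1)).2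

def next_nonterminal_alt (nonterminal : String) : String :=
  String.mk (nextNtB nonterminal.toList)

-- ===== PRECONDITION & SPEC =====
-- Pre_ excludes only the empty string, on which A (and B) raises IndexError.
def Pre_next_nonterminal (nonterminal : String) : Prop := nonterminal ≠ ""
instance (nonterminal : String) : Decidable (Pre_next_nonterminal nonterminal) := by
  unfold Pre_next_nonterminal; infer_instance
def pvWitness_next_nonterminal : String := "AZ"

def Spec_next_nonterminal (nonterminal : String) (out : String) : Prop := out = next_nonterminal_alt nonterminal
instance (nonterminal : String) (out : String) : Decidable (Spec_next_nonterminal nonterminal out) := by unfold Spec_next_nonterminal; infer_instance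

-- ===== CLAIM (what is proved, stated in full; the proofs are below) =====
def Claim_equal_next_nonterminal : Prop := ∀ (nonterminal : String), Dom_next_nonterminal nonterminal → Pre_next_nonterminal nonterminal → Spec_next_nonterminal nonterminal (next_nonterminal nonterminal)

-- ===== LEMMAS AND PROOFS =====

theorem carryB_length (cs : List Char) (i : Nat) : (carryB cs i).1.length = cs.length := by
  fun_induction carryB cs i with
  | case1 cs i h ih => simpa using ih
  | case2 => rfl

theorem carryB_le (cs : List Char) (i : Nat) : (carryB cs i).2 ≤ i := by
  fun_induction carryB cs i with
  | case1 cs i h ih => omega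
  | case2 => simp

theorem carryB_append (a : Char) (cs : List Char) (i : Nat) (hi : i < cs.length) :
    carryB (cs ++ [a]) i = ((carryB cs i).1 ++ [a], (carryB cs i).2) := by
  fun_induction carryB cs i generalizing a with
  | case1 cs i h ih =>
    rw [carryB]
    have hg : (cs ++ [a]).getD i ' ' = cs.getD i ' ' := by
      simp [List.getD, List.getElem?_append_left hi]
    have hset : (cs ++ [a]).set i 'A' = cs.set i 'A' ++ [a] :=
      List.set_append_left _ _ hi
    rw [if_pos (by exact ⟨h.1, by rw [hg]; exact h.2⟩), hset]
    exact ih a (by simp; omega)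
  | case2 cs i h =>
    rw [carryB]
    have hg : (cs ++ [a]).getD i ' ' = cs.getD i ' ' := by
      simp [List.getD, List.getElem?_append_left hi]
    rw [if_neg (by rw [hg]; exact h)]

theorem getD_concat_length (cs : List Char) (a d : Char) :
    (cs ++ [a]).getD cs.length d = a := by
  simp [List.getD]

theorem set_concat_length (cs : List Char) (a v : Char) :
    (cs ++ [a]).set cs.length v = cs ++ [v] := by
  induction cs with
  | nil => rfl
  | cons x xs ih => simp [ih]

theorem finishB_append (cs : List Char) (i : Nat) (hi : i < cs.length) :
    finishB (cs ++ ['A']) i = finishB cs i ++ ['A'] := by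
  unfold finishB
  by_cases hpos : 0 < i
  · rw [if_pos hpos, if_pos hpos]
    rw [show (cs ++ ['A']).getD i ' ' = cs.getD i ' ' by
          simp [List.getD, List.getElem?_append_left hi]]
    exact List.set_append_left _ _ hi
  · rw [if_neg hpos, if_neg hpos]
    match cs with
    | [] => exact absurd hi (by simp)
    | c :: rest =>
      simp only [List.cons_append]
      split_ifs <;> rfl

theorem nextNtB_concat_Z (cs : List Char) (h : cs ≠ []) :
    nextNtB (cs ++ ['Z']) = nextNtB cs ++ ['A'] := by
  have hlen : 0 < cs.length := List.length_pos_iff.mpr h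
  have hi : cs.length - 1 < cs.length := Nat.sub_lt hlen Nat.one_pos
  unfold nextNtB
  rw [show (cs ++ ['Z']).length - 1 = cs.length by simp]
  rw [carryB, if_pos ⟨hlen, getD_concat_length cs 'Z' ' '⟩, set_concat_length,
      carryB_append 'A' cs (cs.length - 1) hi]
  have hple : (carryB cs (cs.length - 1)).2 < (carryB cs (cs.length - 1)).1.length := by
    have := carryB_le cs (cs.length - 1)
    have := carryB_length cs (cs.length - 1)
    omega
  exact finishB_append _ _ hple

theorem nextNtA_eq_nextNtB (cs : List Char) (h : cs ≠ []) : nextNtA cs = nextNtB cs := by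
  induction hn : cs.length using Nat.strong_induction_on generalizing cs with
  | _ n ih =>
  obtain ⟨l, a, rfl⟩ := (List.eq_nil_or_concat cs).resolve_left h
  simp only [List.concat_eq_append] at h hn ⊢
  by_cases hR : l ++ [a] = ['R']
  · rw [hR]; simp [nextNtA, nextNtB, carryB, finishB]
  · rw [nextNtA, dif_neg h]
    have hgl : (l ++ [a]).getLast h = a := by simp
    rw [if_neg hR]
    by_cases hZ : a = 'Z'
    · subst hZ
      rw [hgl, if_neg (by simp)]
      by_cases hl : l = []
      · subst hl; rw [if_neg (by simp)]; simp [nextNtB, carryB, finishB]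
      · have hlen1 : 1 < (l ++ ['Z']).length := by
          have := List.length_pos_iff.mpr hl; simp; omega
        rw [if_pos hlen1, show (l ++ ['Z']).dropLast = l by simp,
            nextNtB_concat_Z l hl, ih l.length (by subst hn; simp) l hl rfl]
    · rw [hgl, if_pos hZ, show (l ++ [a]).dropLast = l by simp]
      -- B side: the carry loop stops immediately since the last char is not 'Z'
      unfold nextNtB
      rw [show (l ++ [a]).length - 1 = l.length by simp]
      rw [carryB, if_neg (by rw [getD_concat_length]; rintro ⟨-, h2⟩; exact hZ h2)]
      unfold finishB
      by_cases hl : l = []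
      · subst hl
        simp only [List.nil_append, List.length_nil]
        rw [if_neg (by omega)]
        have hRne : a ≠ 'R' := fun hc => hR (by simp [hc])
        rw [if_neg hRne, if_neg hZ]
      · rw [if_pos (List.length_pos_iff.mpr hl), getD_concat_length, set_concat_length]

-- ===== VERDICT (by name: the statement is the Claim_ definition above) =====
theorem next_nonterminal_spec : Claim_equal_next_nonterminal := by
  intro s _ hpre
  unfold Spec_next_nonterminal next_nonterminal next_nonterminal_alt
  have hne : s.toList ≠ [] := fun hc => hpre (String.toList_eq_nil_iff.mp hc)
  rw [nextNtA_eq_nextNtB s.toList hne]
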